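-- pv_equiv track=rewrite | github.com/miroegres/AoC2025 | d06/p2.py | find_problem_slices
-- ===== SOURCE A (Python) =====
-- def find_problem_slices(padded):
--     """
--     Scans columns to find contiguous 'problem slices'.
--     A problem slice is a run of columns that is NOT entirely spaces.
--     Slices are separated by columns that are entirely spaces across all rows.
--
--     Args:
--         padded (list[str]): Grid with uniform width.
--
--     Returns:
--         list[tuple[int, int]]: List of (start, end) column ranges for each problem slice (end is exclusive).
--     """
--     n_rows = len(padded)
--     n_cols = len(padded[0]) if padded else 0
--
--     # A separator column is a column that is all spaces from top to bottom.
--     sep_col = [all(padded[r][c] == ' ' for r in range(n_rows)) for c in range(n_cols)]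
--
--     # Group runs of non-separator columns into problem slices.
--     segments = []
--     c = 0
--     while c < n_cols:
--         if sep_col[c]:
--             c += 1
--             continue
--         start = c
--         while c < n_cols and not sep_col[c]:
--             c += 1
--         end = c  # exclusive
--         segments.append((start, end))
--     return segments
-- ===== SOURCE B (Python) =====
-- def find_problem_slices(padded):
--     n_rows = len(padded)
--     n_cols = len(padded[0]) if padded else 0
--     segments = []
--     start = None
--     for c in range(n_cols):
--         is_sep = all(padded[r][c] == ' ' for r in range(n_rows))
--         if is_sep:
--             if start is not None:
--                 segments.append((start, c))
--                 start = None
--         else: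
--             if start is None:
--                 start = c
--     if start is not None:
--         segments.append((start, n_cols))
--     return segments
-- ===== Notes on version B (the rewrite author's own statement) =====
-- stated objective: simpler
-- what changed: B drops the intermediate sep_col table and the nested while-loop grouping, doing one linear pass over the columns with a running start marker that opens a segment at the first non-separator column and closes it at the next separator (or at n_cols).
import Mathlib
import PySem

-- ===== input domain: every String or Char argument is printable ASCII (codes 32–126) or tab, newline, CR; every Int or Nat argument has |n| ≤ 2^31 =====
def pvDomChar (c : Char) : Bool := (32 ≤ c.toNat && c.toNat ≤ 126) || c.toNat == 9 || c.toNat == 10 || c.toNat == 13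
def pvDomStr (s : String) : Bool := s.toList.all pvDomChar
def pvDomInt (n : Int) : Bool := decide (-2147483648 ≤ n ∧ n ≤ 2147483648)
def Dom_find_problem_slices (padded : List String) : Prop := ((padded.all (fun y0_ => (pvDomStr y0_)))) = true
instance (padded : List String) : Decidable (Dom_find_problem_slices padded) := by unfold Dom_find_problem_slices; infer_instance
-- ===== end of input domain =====

-- B replaces A's sep_col table + nested while-loop grouping by one linear pass over the
-- columns with a running `start` marker (objective: simpler; same asymptotic cost).


-- ===== PORT A =====
-- `all(padded[r][c] == ' ' for r in range(n_rows))`: short-circuit scan down the rows.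
-- `none` from pyGet? is Python's IndexError (a too-short row reached); Pre_ excludes those inputs.
def pvColIsSep : List String → Int → Bool
  | [], _ => true
  | s :: rest, c =>
    match PySem.Str.pyGet? s c with
    | none => false
    | some ch => if ch = ' ' then pvColIsSep rest c else false

-- inner `while c < n_cols and not sep_col[c]: c += 1`, consuming the remaining sep list;
-- returns (end, remaining suffix)
def pvAScan : List Bool → Int → (Int × List Bool)
  | [], c => (c, [])
  | b :: rest, c => if b then (c, b :: rest) else pvAScan rest (c + 1)

theorem pvAScan_len : ∀ (l : List Bool) (c : Int), (pvAScan l c).2.length ≤ l.length := by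
  intro l
  induction l with
  | nil => intro c; simp [pvAScan]
  | cons b rest ih =>
    intro c
    by_cases hb : b = true <;> simp [pvAScan, hb]
    exact Nat.le_succ_of_le (ih (c + 1))

-- outer `while c < n_cols` over the sep_col list, the index c tracked alongside
def pvALoop : List Bool → Int → List (Int × Int)
  | [], _ => []
  | b :: rest, c =>
    if b then pvALoop rest (c + 1)
    else
      let p := pvAScan rest (c + 1)
      (c, p.1) :: pvALoop p.2 p.1
termination_by sep _ => sep.length
decreasing_by
  · simp
  · exact Nat.lt_succ_of_le (pvAScan_len rest (c + 1))

def find_problem_slices (padded : List String) : List (Int × Int) :=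
  let n_cols : Int := match padded with | [] => 0 | s :: _ => PySem.Str.len s
  let sep_col := (PySem.List.pyRange 0 n_cols 1).map (fun c => pvColIsSep padded c)
  pvALoop sep_col 0

-- ===== PORT B =====
def find_problem_slices_alt (padded : List String) : List (Int × Int) :=
  let n_cols : Int := match padded with | [] => 0 | s :: _ => PySem.Str.len s
  let st := (PySem.List.pyRange 0 n_cols 1).foldl
    (fun (st : List (Int × Int) × Option Int) c =>
      let is_sep := pvColIsSep padded c
      match st.2 with
      | some s => if is_sep then (st.1 ++ [(s, c)], none) else st
      | none => if is_sep then st else (st.1, some c))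
    ([], none)
  match st.2 with
  | some s => st.1 ++ [(s, n_cols)]
  | none => st.1

-- ===== PRECONDITION & SPEC =====
-- Pre_ excludes exactly the inputs where A raises IndexError: a row shorter than row 0
-- reached (at some column) after every earlier row showed a space there.
def Pre_find_problem_slices (padded : List String) : Prop :=
  ∀ c < (match padded with | [] => 0 | s :: _ => s.toList.length),
    ∀ r < padded.length,
      (∀ r' < r, c < (padded[r']!).toList.length ∧ (padded[r']!).toList[c]! = ' ') →
      c < (padded[r]!).toList.length
instance (padded : List String) : Decidable (Pre_find_problem_slices padded) := by
  unfold Pre_find_problem_slices; infer_instance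

def pvWitness_find_problem_slices : List String := ["ab  cd", "x   yz"]

def Spec_find_problem_slices (padded : List String) (out : List (Int × Int)) : Prop := out = find_problem_slices_alt padded
instance (padded : List String) (out : List (Int × Int)) : Decidable (Spec_find_problem_slices padded out) := by unfold Spec_find_problem_slices; infer_instance

-- ===== CLAIM (what is proved, stated in full; the proofs are below) =====
def Claim_equal_find_problem_slices : Prop := ∀ (padded : List String), Dom_find_problem_slices padded → Pre_find_problem_slices padded → Spec_find_problem_slices padded (find_problem_slices padded)

-- ===== LEMMAS AND PROOFS =====

-- B's loop as explicit recursion over the list of per-column separator flags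
def pvBStep : List Bool → Int → Option Int → List (Int × Int) → List (Int × Int)
  | [], c, some s, acc => acc ++ [(s, c)]
  | [], _, none, acc => acc
  | b :: rest, c, some s, acc =>
      if b then pvBStep rest (c + 1) none (acc ++ [(s, c)]) else pvBStep rest (c + 1) (some s) acc
  | b :: rest, c, none, acc =>
      if b then pvBStep rest (c + 1) none acc else pvBStep rest (c + 1) (some c) acc

theorem pvBStep_acc : ∀ (sep : List Bool) (c : Int) (st : Option Int) (acc : List (Int × Int)),
    pvBStep sep c st acc = acc ++ pvBStep sep c st [] := by
  intro sep
  induction sep with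
  | nil => intro c st acc; cases st <;> simp [pvBStep]
  | cons b rest ih =>
    intro c st acc
    cases st with
    | none =>
      by_cases hb : b = true <;> simp only [pvBStep, hb, if_true] <;> exact ih _ _ _
    | some s =>
      by_cases hb : b = true <;> simp only [pvBStep, hb, if_true]
      · rw [ih (c + 1) none (acc ++ [(s, c)]), ih (c + 1) none ([] ++ [(s, c)])]
        simp
      · exact ih _ _ _

-- an open run in B behaves like A's inner scan
theorem pvBStep_run : ∀ (sep : List Bool) (c s : Int),
    pvBStep sep c (some s) [] =
      (s, (pvAScan sep c).1) :: pvBStep (pvAScan sep c).2 (pvAScan sep c).1 none [] := by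
  intro sep
  induction sep with
  | nil => intro c s; simp [pvAScan, pvBStep]
  | cons b rest ih =>
    intro c s
    by_cases hb : b = true
    · simp only [pvBStep, pvAScan, hb, if_true]
      rw [pvBStep_acc]
      simp [pvBStep]
    · simp only [pvBStep, pvAScan, hb]
      exact ih (c + 1) s

-- A's grouping loop equals B's state machine (strong induction: A recurses on a suffix)
theorem pvALoop_eq_pvBStep : ∀ (n : Nat) (sep : List Bool), sep.length ≤ n →
    ∀ c : Int, pvALoop sep c = pvBStep sep c none [] := by
  intro n
  induction n with
  | zero =>
    intro sep hlen c
    have : sep = [] := List.eq_nil_of_length_eq_zero (Nat.le_zero.mp hlen)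
    subst this; simp [pvALoop, pvBStep]
  | succ m ih =>
    intro sep hlen c
    cases sep with
    | nil => simp [pvALoop, pvBStep]
    | cons b rest =>
      by_cases hb : b = true
      · simp only [pvALoop, pvBStep, hb, if_true]
        exact ih rest (by simpa using Nat.lt_succ_iff.mp (Nat.lt_of_lt_of_le (Nat.lt_succ_self _) hlen)) (c + 1)
      · simp only [pvALoop, pvBStep, hb]
        rw [pvBStep_run]
        have hsc : (pvAScan rest (c + 1)).2.length ≤ m := by
          have := pvAScan_len rest (c + 1)
          simp at hlen; omega
        rw [ih _ hsc]
        simp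

-- B's fold over a consecutive Int range, with the final flush, equals pvBStep on the mapped flags
theorem pvFold_eq_pvBStep (padded : List String) : ∀ (k : Nat) (c : Int)
    (acc : List (Int × Int)) (start : Option Int),
    (let st := (PySem.List.pyRange c (c + k) 1).foldl
      (fun (st : List (Int × Int) × Option Int) c =>
        let is_sep := pvColIsSep padded c
        match st.2 with
        | some s => if is_sep then (st.1 ++ [(s, c)], none) else st
        | none => if is_sep then st else (st.1, some c))
      (acc, start)
     match st.2 with
     | some s => st.1 ++ [(s, c + k)]
     | none => st.1)
    = pvBStep ((PySem.List.pyRange c (c + k) 1).map (fun j => pvColIsSep padded j)) c start acc := by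
  intro k
  induction k with
  | zero =>
    intro c acc start
    rw [PySem.List.pyRange_one_eq_nil (by omega)]
    cases start <;> simp [pvBStep]
  | succ m ih =>
    intro c acc start
    have hcons : PySem.List.pyRange c (c + (m + 1 : Nat)) 1
        = c :: PySem.List.pyRange (c + 1) (c + (m + 1 : Nat)) 1 :=
      PySem.List.pyRange_one_cons (by push_cast; omega)
    have harith : c + ((m : Int) + 1) = (c + 1) + (m : Nat) := by push_cast; ring
    -- (push_cast below normalises the Nat-cast (m+1) so harith applies)
    rw [hcons]
    simp only [List.foldl_cons, List.map_cons]
    push_cast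
    rw [harith]
    cases start with
    | none =>
      by_cases hs : pvColIsSep padded c = true
      · simp only [pvBStep, hs, if_true]
        exact ih (c + 1) acc none
      · simp only [pvBStep, hs, Bool.false_eq_true, if_false]
        exact ih (c + 1) acc (some c)
    | some s =>
      by_cases hs : pvColIsSep padded c = true
      · simp only [pvBStep, hs, if_true]
        exact ih (c + 1) (acc ++ [(s, c)]) none
      · simp only [pvBStep, hs, Bool.false_eq_true, if_false]
        exact ih (c + 1) acc (some s)

theorem ports_core (padded : List String) (n : Int) (hnn : 0 ≤ n) :
    pvALoop ((PySem.List.pyRange 0 n 1).map (fun c => pvColIsSep padded c)) 0 =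
      (let st := (PySem.List.pyRange 0 n 1).foldl
        (fun (st : List (Int × Int) × Option Int) c =>
          let is_sep := pvColIsSep padded c
          match st.2 with
          | some s => if is_sep then (st.1 ++ [(s, c)], none) else st
          | none => if is_sep then st else (st.1, some c))
        ([], none)
       match st.2 with
       | some s => st.1 ++ [(s, n)]
       | none => st.1) := by
  have hcast : (0 : Int) + (n.toNat : Int) = n := by omega
  have h := pvFold_eq_pvBStep padded n.toNat 0 [] none
  rw [hcast] at h
  rw [h]
  exact pvALoop_eq_pvBStep _ _ le_rfl 0

theorem ports_agree (padded : List String) :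
    find_problem_slices padded = find_problem_slices_alt padded := by
  unfold find_problem_slices find_problem_slices_alt
  exact ports_core padded _ (by cases padded <;> simp [PySem.Str.len_eq])

-- ===== VERDICT (by name: the statement is the Claim_ definition above) =====
theorem find_problem_slices_spec : Claim_equal_find_problem_slices := by
  intro padded _ _
  unfold Spec_find_problem_slices
  exact ports_agree padded
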